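-- pv_equiv track=rewrite | github.com/mdandre89/Codewars-exercises | simple-fun-number-160-cut-the-ropes/simple-fun-number-160-cut-the-ropes.py | cut_the_ropes
-- ===== SOURCE A (Python) =====
-- def cut_the_ropes(arr):
--     l = len(arr)
--     t = []
--     while sum(arr)!=0:
--         n = min([i for i in arr if i>0])
--         t.append(l-arr.count(0))
--         arr = [i - n if i>0 else 0 for i in arr ]
--     return t
-- ===== SOURCE B (Python) =====
-- def cut_the_ropes(arr):
--     if sum(arr) == 0:
--         return []
--     pos = sorted(x for x in arr if x > 0)
--     res = [sum(1 for x in arr if x != 0)]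
--     prev = pos[0]
--     remaining = len(pos) - 1
--     for v in pos[1:]:
--         if v != prev:
--             res.append(remaining)
--             prev = v
--         remaining -= 1
--     return res
-- ===== Notes on version B (the rewrite author's own statement) =====
-- stated objective: faster
-- what changed: B sorts the positive lengths once and emits, in a single scan, the count of nonzero ropes and then the number of remaining ropes at each new distinct value, replacing A's repeated subtract-the-minimum simulation with its inner min/count/rebuild passes.
import Mathlib
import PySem

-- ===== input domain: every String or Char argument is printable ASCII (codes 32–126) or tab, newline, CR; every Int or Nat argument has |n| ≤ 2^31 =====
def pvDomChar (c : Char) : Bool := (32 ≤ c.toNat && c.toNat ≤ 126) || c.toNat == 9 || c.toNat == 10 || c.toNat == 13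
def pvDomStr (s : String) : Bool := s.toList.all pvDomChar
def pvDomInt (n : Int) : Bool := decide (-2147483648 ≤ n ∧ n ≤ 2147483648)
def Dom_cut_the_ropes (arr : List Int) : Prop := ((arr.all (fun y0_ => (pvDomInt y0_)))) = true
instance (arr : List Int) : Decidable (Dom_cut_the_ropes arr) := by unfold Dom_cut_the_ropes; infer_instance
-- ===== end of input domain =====

-- B replaces A's repeated subtract-the-minimum simulation by one sort of the positive
-- lengths and a single scan (objective: faster, asymptotic).

-- ===== PORT A =====

-- 'arr = [i - n if i>0 else 0 for i in arr]'
def subAll (arr : List Int) (n : Int) : List Int :=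
  arr.map (fun i => if 0 < i then i - n else 0)

-- termination fact for A's while loop: subtracting the minimum positive value
-- strictly decreases the number of positive elements
theorem cutLoopA_dec (arr : List Int) (n : Int)
    (h : PySem.List.min? (arr.filter (fun i => decide (0 < i))) (fun x => x) = some n) :
    (subAll arr n).countP (fun i => decide (0 < i)) <
      arr.countP (fun i => decide (0 < i)) := by
  have hmem := PySem.List.min?_mem h
  have hpos : (0:Int) < n := by
    have := List.of_mem_filter hmem
    simpa using this
  have hmem' : n ∈ arr := List.mem_of_mem_filter hmem
  have h1 : (subAll arr n).countP (fun i => decide (0 < i))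
      = arr.countP (fun i => decide (n < i)) := by
    rw [subAll, List.countP_map]
    apply List.countP_congr
    intro x _
    by_cases hx : 0 < x <;> simp [hx] <;> omega
  rw [h1, List.countP_eq_length_filter, List.countP_eq_length_filter]
  have hsub : arr.filter (fun i => decide (n < i)) =
      (arr.filter (fun i => decide (0 < i))).filter (fun i => decide (n < i)) := by
    rw [List.filter_filter]
    apply List.filter_congr
    intro x _
    by_cases hx : n < x <;> simp [hx] <;> omega
  rw [hsub]
  have hlt : ∃ x ∈ arr.filter (fun i => decide (0 < i)), ¬ (fun i => decide (n < i)) x = true := by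
    exact ⟨n, hmem, by simp⟩
  calc ((arr.filter (fun i => decide (0 < i))).filter (fun i => decide (n < i))).length
      < (arr.filter (fun i => decide (0 < i))).length := by
        apply List.length_filter_lt_length_iff_exists.mpr
        simpa using hlt

-- the while loop of A (state: current arr, accumulated t; l fixed);
-- the 'none' branch is where Python raises ValueError (min of empty list) — excluded by Pre_
def cutLoopA (l : Int) (arr : List Int) (t : List Int) : List Int :=
  if arr.sum ≠ 0 then
    match h : PySem.List.min? (arr.filter (fun i => decide (0 < i))) (fun x => x) with
    | none => t
    | some n =>
        cutLoopA l (subAll arr n)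
          (t ++ [l - (PySem.List.count arr 0 : Int)])
  else t
termination_by arr.countP (fun i => decide (0 < i))
decreasing_by exact cutLoopA_dec arr n h

def cut_the_ropes (arr : List Int) : List Int :=
  cutLoopA (arr.length : Int) arr []

-- ===== PORT B =====

-- the for loop of Source B (state: res, prev, remaining)
def goB : List Int → List Int → Int → Int → List Int
  | [], res, _, _ => res
  | v :: rest, res, prev, rem =>
    if v ≠ prev then goB rest (res ++ [rem]) v (rem - 1)
    else goB rest res prev (rem - 1)

def cut_the_ropes_alt (arr : List Int) : List Int :=
  if arr.sum = 0 then []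
  else
    let pos := PySem.List.sorted (arr.filter (fun x => decide (0 < x))) (fun x => x) false
    match pos with
    | [] => []  -- Python's pos[0] raises IndexError here (excluded by Pre_)
    | p0 :: rest =>
        goB rest [(arr.map (fun x => if x ≠ 0 then (1:Int) else 0)).sum] p0
          ((pos.length : Int) - 1)

-- ===== PRECONDITION & SPEC =====
-- Pre_ excludes exactly the inputs where A raises: nonzero total with no positive element
-- (min of an empty list raises ValueError; B's pos[0] raises IndexError there too).
def Pre_cut_the_ropes (arr : List Int) : Prop := arr.sum = 0 ∨ ∃ x ∈ arr, 0 < x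
instance (arr : List Int) : Decidable (Pre_cut_the_ropes arr) := by
  unfold Pre_cut_the_ropes; infer_instance

def pvWitness_cut_the_ropes : List Int := [3, 3, 2, 9, 0]

def Spec_cut_the_ropes (arr : List Int) (out : List Int) : Prop := out = cut_the_ropes_alt arr
instance (arr : List Int) (out : List Int) : Decidable (Spec_cut_the_ropes arr out) := by
  unfold Spec_cut_the_ropes; infer_instance

-- ===== CLAIM (what is proved, stated in full; the proofs are below) =====
def Claim_equal_cut_the_ropes : Prop := ∀ (arr : List Int), Dom_cut_the_ropes arr →
  Pre_cut_the_ropes arr → Spec_cut_the_ropes arr (cut_the_ropes arr)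

-- ===== LEMMAS AND PROOFS =====

-- recursive reformulation of Source B's scan, without the res accumulator
def scanR : List Int → Int → Int → List Int
  | [], _, _ => []
  | v :: rest, prev, rem =>
    if v ≠ prev then rem :: scanR rest v (rem - 1) else scanR rest prev (rem - 1)

theorem goB_eq_scanR (s : List Int) : ∀ (res : List Int) (prev rem : Int),
    goB s res prev rem = res ++ scanR s prev rem := by
  induction s with
  | nil => intro res prev rem; simp [goB, scanR]
  | cons v rest ih =>
    intro res prev rem
    by_cases h : v = prev <;> simp [goB, scanR, h, ih]

theorem scanR_shift (s : List Int) : ∀ (prev rem c : Int),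
    scanR (s.map (fun x => x - c)) (prev - c) rem = scanR s prev rem := by
  induction s with
  | nil => intro prev rem c; simp [scanR]
  | cons v rest ih =>
    intro prev rem c
    by_cases h : v = prev
    · simp [scanR, h, ih]
    · have h' : v - c ≠ prev - c := fun hc => h (by omega)
      simp [scanR, h, h', ih]

theorem scanR_eat (rest : List Int) : ∀ (v rem : Int),
    rest.Pairwise (· ≤ ·) → (∀ x ∈ rest, v ≤ x) →
    scanR rest v rem =
      scanR (rest.filter (fun x => decide (v < x))) v
        (rem - ((rest.length : Int) - ((rest.filter (fun x => decide (v < x))).length : Int))) := by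
  induction rest with
  | nil => intro v rem _ _; simp [scanR]
  | cons x xs ih =>
    intro v rem hpw hge
    have hpw' : xs.Pairwise (· ≤ ·) := hpw.of_cons
    have hxle : ∀ y ∈ xs, x ≤ y := fun y hy => List.rel_of_pairwise_cons hpw hy
    by_cases hx : x = v
    · subst hx
      have : ¬ (x < x) := lt_irrefl x
      rw [show scanR (x :: xs) x rem = scanR xs x (rem - 1) by simp [scanR]]
      rw [ih x (rem - 1) hpw' hxle]
      simp [List.filter_cons, this]
      congr 1
      push_cast
      ring
    · have hvx : v < x := lt_of_le_of_ne (hge x (by simp)) (Ne.symm hx)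
      have hall : xs.filter (fun y => decide (v < y)) = xs := by
        apply List.filter_eq_self.mpr
        intro y hy
        simp
        exact lt_of_lt_of_le hvx (hxle y hy)
      simp [List.filter_cons, hvx, hall]

-- arithmetic split of the length of a nonnegative list into positives and zeros
theorem length_split (arr : List Int) (h : ∀ x ∈ arr, 0 ≤ x) :
    arr.length = (arr.filter (fun x => decide (0 < x))).length + arr.count 0 := by
  induction arr with
  | nil => simp
  | cons x xs ih =>
    have hx := h x (by simp)
    have ih' := ih (fun y hy => h y (by simp [hy]))
    by_cases hx0 : x = 0
    · subst hx0; simp [List.filter_cons, List.count_cons]; omega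
    · have hxp : (0:Int) < x := lt_of_le_of_ne hx (Ne.symm hx0)
      simp [List.filter_cons, hxp, List.count_cons, hx0]
      omega

theorem sum_pos_of_mem (arr : List Int) (h : ∀ x ∈ arr, 0 ≤ x)
    (y : Int) (hy : y ∈ arr) (hyp : 0 < y) : 0 < arr.sum := by
  induction arr with
  | nil => simp at hy
  | cons x xs ih =>
    have hs : (0:Int) ≤ xs.sum := List.sum_nonneg (fun z hz => h z (by simp [hz]))
    rcases List.mem_cons.mp hy with hxy | hxs
    · subst hxy; simp; omega
    · have hx := h x (by simp)
      have := ih (fun z hz => h z (by simp [hz])) hxs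
      simp; omega

-- filter of the subtracted list
theorem filter_map_sub (arr : List Int) (n : Int) (hn : 0 < n) :
    (arr.map (fun i => if 0 < i then i - n else 0)).filter (fun x => decide (0 < x)) =
      (arr.filter (fun x => decide (n < x))).map (fun x => x - n) := by
  induction arr with
  | nil => simp
  | cons x xs ih =>
    by_cases hx : n < x
    · have hx0 : (0:Int) < x := lt_trans hn hx
      have hx' : (0:Int) < x - n := by omega
      simp [List.filter_cons, hx, hx0, hx', ih]
    · by_cases hx0 : (0:Int) < x
      · have : ¬ (0:Int) < x - n := by omega
        simp [List.filter_cons, hx, hx0, this, ih]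
      · simp [List.filter_cons, hx, hx0, ih]

-- unfolding lemmas for A's loop
theorem cutLoopA_sum_zero (l : Int) (arr t : List Int) (h : arr.sum = 0) :
    cutLoopA l arr t = t := by
  rw [cutLoopA]; simp [h]

theorem cutLoopA_none (l : Int) (arr t : List Int) (hs : arr.sum ≠ 0)
    (h : PySem.List.min? (arr.filter (fun i => decide (0 < i))) (fun x => x) = none) :
    cutLoopA l arr t = t := by
  rw [cutLoopA, if_pos hs]
  split
  · rfl
  · rename_i n heq; rw [h] at heq; exact absurd heq (by simp)

theorem cutLoopA_some (l : Int) (arr t : List Int) (n : Int) (hs : arr.sum ≠ 0)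
    (h : PySem.List.min? (arr.filter (fun i => decide (0 < i))) (fun x => x) = some n) :
    cutLoopA l arr t = cutLoopA l (subAll arr n) (t ++ [l - (PySem.List.count arr 0 : Int)]) := by
  rw [cutLoopA, if_pos hs]
  split
  · rename_i heq; rw [h] at heq; exact absurd heq (by simp)
  · rename_i m heq; rw [h] at heq; injection heq with heq; rw [heq]

-- accumulator lemma for A's loop
theorem cutLoopA_acc (N : ℕ) : ∀ (l : Int) (arr t : List Int),
    (arr.filter (fun x => decide (0 < x))).length ≤ N →
    cutLoopA l arr t = t ++ cutLoopA l arr [] := by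
  induction N with
  | zero =>
    intro l arr t hlen
    have hnil : arr.filter (fun x => decide (0 < x)) = [] :=
      List.length_eq_zero_iff.mp (Nat.le_zero.mp hlen)
    by_cases hs : arr.sum = 0
    · rw [cutLoopA_sum_zero l arr t hs, cutLoopA_sum_zero l arr [] hs, List.append_nil]
    · have hmin : PySem.List.min? (arr.filter (fun i => decide (0 < i))) (fun x => x) = none := by
        rw [PySem.List.min?_eq_none_iff]; exact hnil
      rw [cutLoopA_none l arr t hs hmin, cutLoopA_none l arr [] hs hmin, List.append_nil]
  | succ N ih =>
    intro l arr t hlen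
    by_cases hs : arr.sum = 0
    · rw [cutLoopA_sum_zero l arr t hs, cutLoopA_sum_zero l arr [] hs, List.append_nil]
    · cases hmin : PySem.List.min? (arr.filter (fun i => decide (0 < i))) (fun x => x) with
      | none =>
        rw [cutLoopA_none l arr t hs hmin, cutLoopA_none l arr [] hs hmin, List.append_nil]
      | some n =>
        have hdec : ((subAll arr n).filter (fun x => decide (0 < x))).length ≤ N := by
          have := cutLoopA_dec arr n hmin
          rw [List.countP_eq_length_filter, List.countP_eq_length_filter] at this
          omega
        rw [cutLoopA_some l arr t n hs hmin, cutLoopA_some l arr [] n hs hmin,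
          List.nil_append,
          ih l (subAll arr n) (t ++ [l - (PySem.List.count arr 0 : Int)]) hdec,
          ih l (subAll arr n) [l - (PySem.List.count arr 0 : Int)] hdec,
          List.append_assoc]

-- if there is no positive element, A's loop exits at once and B's scan is empty
theorem bridge_nil (arr : List Int)
    (hnil : arr.filter (fun x => decide (0 < x)) = [])
    (hpre : ∀ x ∈ arr, 0 ≤ x) :
    cutLoopA (arr.length : Int) arr [] =
      scanR (PySem.List.sorted (arr.filter (fun x => decide (0 < x))) (fun x => x) false) 0
        ((PySem.List.sorted (arr.filter (fun x => decide (0 < x))) (fun x => x) false).length : Int) := by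
  have hsum : arr.sum = 0 := by
    apply List.sum_eq_zero
    intro x hx
    by_contra hne
    have hxp : (0:Int) < x := lt_of_le_of_ne (hpre x hx) (Ne.symm hne)
    have : x ∈ arr.filter (fun x => decide (0 < x)) := List.mem_filter.mpr ⟨hx, by simpa⟩
    rw [hnil] at this
    simp at this
  rw [cutLoopA_sum_zero _ _ _ hsum, hnil]
  have : PySem.List.sorted ([] : List Int) (fun x => x) false = [] := rfl
  rw [this]
  simp [scanR]

-- main bridge
theorem main_bridge (N : ℕ) : ∀ (arr : List Int),
    (arr.filter (fun x => decide (0 < x))).length ≤ N →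
    (∀ x ∈ arr, 0 ≤ x) →
    cutLoopA (arr.length : Int) arr [] =
      scanR (PySem.List.sorted (arr.filter (fun x => decide (0 < x))) (fun x => x) false) 0
        ((PySem.List.sorted (arr.filter (fun x => decide (0 < x))) (fun x => x) false).length : Int) := by
  induction N with
  | zero =>
    intro arr hlen hpre
    exact bridge_nil arr (List.length_eq_zero_iff.mp (Nat.le_zero.mp hlen)) hpre
  | succ N ih =>
    intro arr hlen hpre
    by_cases hnil : arr.filter (fun x => decide (0 < x)) = []
    · exact bridge_nil arr hnil hpre
    · -- there is a positive element; n = its minimum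
      cases hmin : PySem.List.min? (arr.filter (fun i => decide (0 < i))) (fun x => x) with
      | none => exact absurd ((PySem.List.min?_eq_none_iff _ _).mp hmin) hnil
      | some n =>
      have hnmemf := PySem.List.min?_mem hmin
      have hnpos : (0:Int) < n := by simpa using List.of_mem_filter hnmemf
      have hnmem : n ∈ arr := List.mem_of_mem_filter hnmemf
      have hnmin : ∀ y ∈ arr.filter (fun i => decide (0 < i)), n ≤ y := by
        intro y hy; exact PySem.List.min?_isMin hmin y hy
      have hsum : arr.sum ≠ 0 := ne_of_gt (sum_pos_of_mem arr hpre n hnmem hnpos)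
      -- the sorted positive list starts with n
      have hperm : (PySem.List.sorted (arr.filter (fun x => decide (0 < x))) (fun x => x) false).Perm
          (arr.filter (fun x => decide (0 < x))) := PySem.List.sorted_perm _ _ _
      cases hs :
          PySem.List.sorted (arr.filter (fun x => decide (0 < x))) (fun x => x) false with
      | nil =>
        rw [hs] at hperm
        exact absurd (hperm.nil_eq).symm hnil
      | cons hd rest =>
      rw [hs] at hperm
      have hpw : (hd :: rest).Pairwise (fun a b => a ≤ b) := by
        have := PySem.List.sorted_pairwise (arr.filter (fun x => decide (0 < x))) (fun x => x) ..
        rw [hs] at this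
        exact this
      have hhd : hd = n := by
        have h1 : n ≤ hd := hnmin hd (hperm.mem_iff.mp (by simp))
        have h2 : hd ≤ n := by
          have := PySem.List.key_head_sorted_le (xs := arr.filter (fun x => decide (0 < x)))
            (key := fun x => x) hs
          exact this n hnmemf
        omega
      subst hd
      -- unfold one iteration of A's loop
      have hdec : ((subAll arr n).filter (fun x => decide (0 < x))).length ≤ N := by
        have := cutLoopA_dec arr n hmin
        rw [List.countP_eq_length_filter, List.countP_eq_length_filter] at this
        omega
      have hpre' : ∀ x ∈ subAll arr n, 0 ≤ x := by
        intro x hx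
        rw [subAll, List.mem_map] at hx
        obtain ⟨i, hi, rfl⟩ := hx
        by_cases hip : 0 < i
        · have : n ≤ i := hnmin i (List.mem_filter.mpr ⟨hi, by simpa⟩)
          simp [hip]; omega
        · simp [hip]
      have hlen' : ((subAll arr n).length : Int) = (arr.length : Int) := by
        simp [subAll]
      have ihs := ih (subAll arr n) hdec hpre'
      rw [hlen'] at ihs
      -- the positives after the subtraction: rest's elements above n, shifted down by n
      have hpos' : (subAll arr n).filter (fun x => decide (0 < x)) =
          ((arr.filter (fun x => decide (0 < x))).filter (fun x => decide (n < x))).map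
            (fun x => x - n) := by
        rw [subAll, filter_map_sub arr n hnpos]
        congr 1
        rw [List.filter_filter]
        apply List.filter_congr
        intro x _
        by_cases hx : n < x <;> simp [hx] <;> omega
      have hrest' : PySem.List.sorted ((subAll arr n).filter (fun x => decide (0 < x)))
          (fun x => x) false =
          (rest.filter (fun x => decide (n < x))).map (fun x => x - n) := by
        apply PySem.List.sorted_id_eq_of_perm_of_pairwise
        · rw [hpos']
          apply List.Perm.map
          have hpf : ((n :: rest).filter (fun x => decide (n < x))).Perm
              ((arr.filter (fun x => decide (0 < x))).filter (fun x => decide (n < x))) :=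
            hperm.filter _
          simpa [List.filter_cons, lt_irrefl n] using hpf
        · rw [List.pairwise_map]
          have : (rest.filter (fun x => decide (n < x))).Pairwise (fun a b => a ≤ b) :=
            (hpw.of_cons).filter _
          exact this.imp (by intro a b hab; omega)
      -- first emitted count = number of positive ropes
      have hcount : (arr.length : Int) - (PySem.List.count arr 0 : Int) =
          ((n :: rest).length : Int) := by
        have h1 := length_split arr hpre
        have h2 : (n :: rest).length = (arr.filter (fun x => decide (0 < x))).length :=
          hperm.length_eq
        rw [PySem.List.count_eq]
        omega
      rw [cutLoopA_some _ arr [] n hsum hmin, List.nil_append,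
        cutLoopA_acc (((subAll arr n).filter (fun x => decide (0 < x))).length)
          _ (subAll arr n) _ le_rfl,
        ihs, hrest']
      -- now compute B's scan on n :: rest
      have hne0 : n ≠ 0 := ne_of_gt hnpos
      rw [show scanR (n :: rest) 0 (((n :: rest).length : Nat) : Int) =
            (((n :: rest).length : Nat) : Int) ::
              scanR rest n ((((n :: rest).length : Nat) : Int) - 1) by
          simp [scanR, hne0]]
      rw [scanR_eat rest n _ hpw.of_cons
        (fun y hy => List.rel_of_pairwise_cons hpw hy)]
      have hargs : (((n :: rest).length : Nat) : Int) - 1 -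
          ((rest.length : Int) - ((rest.filter (fun x => decide (n < x))).length : Int)) =
          (((rest.filter (fun x => decide (n < x))).map (fun x => x - n)).length : Int) := by
        simp only [List.length_map, List.length_cons]
        push_cast
        ring
      rw [hargs, hcount,
        ← scanR_shift (rest.filter (fun x => decide (n < x))) n _ n, sub_self]
      rfl

-- any list splits into its zeros and its nonzero elements
-- (Source B's 'sum(1 for x in arr if x != 0)' is the 0/1 sum here)
theorem count_zero_add_sum (arr : List Int) :
    (arr.count 0 : Int) + (arr.map (fun x => if x ≠ 0 then (1:Int) else 0)).sum =
      (arr.length : Int) := by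
  have h1 : (arr.map (fun x => if x ≠ 0 then (1:Int) else 0)).sum
      = ((arr.countP (fun x => decide (x ≠ 0))) : Int) := by
    rw [← PySem.List.sum_map_ite_one_zero (fun x => decide (x ≠ 0)) arr]
    simp
  have h2 : arr.count 0 + arr.countP (fun x => decide (x ≠ 0)) = arr.length := by
    have := List.length_eq_countP_add_countP (p := fun x : Int => x == 0) (l := arr)
    have hc : arr.countP (fun a : Int => decide ¬(a == 0) = true) =
        arr.countP (fun x => decide (x ≠ 0)) := by
      apply List.countP_congr
      intro x _
      by_cases hx : x = 0 <;> simp [hx]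
    rw [hc] at this
    rw [List.count]
    omega
  rw [h1]
  omega

-- the first loop iteration of A lines up with B's guard, first entry and scan
theorem top_bridge (arr : List Int) (hpre : Pre_cut_the_ropes arr) :
    cutLoopA (arr.length : Int) arr [] = cut_the_ropes_alt arr := by
  unfold cut_the_ropes_alt
  by_cases hsum : arr.sum = 0
  · rw [cutLoopA_sum_zero _ _ _ hsum, if_pos hsum]
  · rw [if_neg hsum]
    rcases hpre with h | ⟨p, hpmem, hppos⟩
    · exact absurd h hsum
    have hnil : arr.filter (fun x => decide (0 < x)) ≠ [] := by
      intro h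
      have : p ∈ arr.filter (fun x => decide (0 < x)) :=
        List.mem_filter.mpr ⟨hpmem, by simpa⟩
      simp [h] at this
    cases hmin : PySem.List.min? (arr.filter (fun i => decide (0 < i))) (fun x => x) with
    | none => exact absurd ((PySem.List.min?_eq_none_iff _ _).mp hmin) hnil
    | some n =>
    have hnmemf := PySem.List.min?_mem hmin
    have hnpos : (0:Int) < n := by simpa using List.of_mem_filter hnmemf
    have hnmin : ∀ y ∈ arr.filter (fun i => decide (0 < i)), n ≤ y := by
      intro y hy; exact PySem.List.min?_isMin hmin y hy
    have hperm : (PySem.List.sorted (arr.filter (fun x => decide (0 < x))) (fun x => x) false).Perm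
        (arr.filter (fun x => decide (0 < x))) := PySem.List.sorted_perm _ _ _
    cases hs :
        PySem.List.sorted (arr.filter (fun x => decide (0 < x))) (fun x => x) false with
    | nil =>
      rw [hs] at hperm
      exact absurd (hperm.nil_eq).symm hnil
    | cons hd rest =>
    rw [hs] at hperm
    have hpw : (hd :: rest).Pairwise (fun a b => a ≤ b) := by
      have := PySem.List.sorted_pairwise (arr.filter (fun x => decide (0 < x))) (fun x => x) ..
      rw [hs] at this
      exact this
    have hhd : hd = n := by
      have h1 : n ≤ hd := hnmin hd (hperm.mem_iff.mp (by simp))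
      have h2 : hd ≤ n := by
        have := PySem.List.key_head_sorted_le (xs := arr.filter (fun x => decide (0 < x)))
          (key := fun x => x) hs
        exact this n hnmemf
      omega
    subst hd
    have hpre' : ∀ x ∈ subAll arr n, 0 ≤ x := by
      intro x hx
      rw [subAll, List.mem_map] at hx
      obtain ⟨i, hi, rfl⟩ := hx
      by_cases hip : 0 < i
      · have : n ≤ i := hnmin i (List.mem_filter.mpr ⟨hi, by simpa⟩)
        simp [hip]; omega
      · simp [hip]
    have hlen' : ((subAll arr n).length : Int) = (arr.length : Int) := by
      simp [subAll]
    have ihs := main_bridge ((subAll arr n).filter (fun x => decide (0 < x))).length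
      (subAll arr n) le_rfl hpre'
    rw [hlen'] at ihs
    have hpos' : (subAll arr n).filter (fun x => decide (0 < x)) =
        ((arr.filter (fun x => decide (0 < x))).filter (fun x => decide (n < x))).map
          (fun x => x - n) := by
      rw [subAll, filter_map_sub arr n hnpos]
      congr 1
      rw [List.filter_filter]
      apply List.filter_congr
      intro x _
      by_cases hx : n < x <;> simp [hx] <;> omega
    have hrest' : PySem.List.sorted ((subAll arr n).filter (fun x => decide (0 < x)))
        (fun x => x) false =
        (rest.filter (fun x => decide (n < x))).map (fun x => x - n) := by
      apply PySem.List.sorted_id_eq_of_perm_of_pairwise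
      · rw [hpos']
        apply List.Perm.map
        have hpf : ((n :: rest).filter (fun x => decide (n < x))).Perm
            ((arr.filter (fun x => decide (0 < x))).filter (fun x => decide (n < x))) :=
          hperm.filter _
        simpa [List.filter_cons, lt_irrefl n] using hpf
      · rw [List.pairwise_map]
        have : (rest.filter (fun x => decide (n < x))).Pairwise (fun a b => a ≤ b) :=
          (hpw.of_cons).filter _
        exact this.imp (by intro a b hab; omega)
    have hcount : (arr.length : Int) - (PySem.List.count arr 0 : Int) =
        (arr.map (fun x => if x ≠ 0 then (1:Int) else 0)).sum := by
      rw [PySem.List.count_eq]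
      have := count_zero_add_sum arr
      omega
    rw [cutLoopA_some _ arr [] n hsum hmin, List.nil_append,
      cutLoopA_acc (((subAll arr n).filter (fun x => decide (0 < x))).length)
        _ (subAll arr n) _ le_rfl,
      ihs, hrest']
    show _ = goB rest [(arr.map (fun x => if x ≠ 0 then (1:Int) else 0)).sum] n
      ((((n :: rest).length : Nat) : Int) - 1)
    rw [goB_eq_scanR]
    rw [scanR_eat rest n _ hpw.of_cons
      (fun y hy => List.rel_of_pairwise_cons hpw hy)]
    have hargs : (((n :: rest).length : Nat) : Int) - 1 -
        ((rest.length : Int) - ((rest.filter (fun x => decide (n < x))).length : Int)) =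
        (((rest.filter (fun x => decide (n < x))).map (fun x => x - n)).length : Int) := by
      simp only [List.length_map, List.length_cons]
      push_cast
      ring
    rw [hargs, hcount,
      ← scanR_shift (rest.filter (fun x => decide (n < x))) n _ n, sub_self]

-- ===== VERDICT (by name: the statement is the Claim_ definition above) =====
theorem cut_the_ropes_spec : Claim_equal_cut_the_ropes := by
  intro arr _ hpre
  unfold Spec_cut_the_ropes cut_the_ropes
  exact top_bridge arr hpre
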